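-- pv_equiv track=rewrite | github.com/frostblossom/pokitsprite | pokitsprite.py | shrink_palette_space
-- ===== SOURCE A (Python) =====
-- def shrink_palette_space(intseq):
--     mappings = {0:0}
--     reverts = [0]
--     accum = []
--     new_color_counter = 1
--     for index in intseq:
--         indmap = mappings.get(index, None)
--         if (indmap != None):
--             accum.append(indmap)
--         else:
--             mappings.update({index:new_color_counter})
--             accum.append(new_color_counter)
--             reverts.append(index)
--             new_color_counter = new_color_counter + 1
--     return {'mapping': reverts, 'seq': accum}
-- ===== SOURCE B (Python) =====
-- def shrink_palette_space(intseq):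
--     intseq = list(intseq)
--     # the palette list IS the mapping: a value's compact index is its position here
--     reverts = [0]
--     for v in intseq:
--         if v not in reverts:
--             reverts.append(v)
--     return {'mapping': reverts, 'seq': [reverts.index(v) for v in intseq]}
-- ===== Notes on version B (the rewrite author's own statement) =====
-- stated objective: simpler
-- what changed: B drops the dict and the color counter entirely: the revert list itself serves as the mapping (a value's compact index is its position in the ordered-dedup palette, recovered with list.index), instead of A's interleaved loop maintaining a dict, a counter and the output at once.
import Mathlib
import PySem

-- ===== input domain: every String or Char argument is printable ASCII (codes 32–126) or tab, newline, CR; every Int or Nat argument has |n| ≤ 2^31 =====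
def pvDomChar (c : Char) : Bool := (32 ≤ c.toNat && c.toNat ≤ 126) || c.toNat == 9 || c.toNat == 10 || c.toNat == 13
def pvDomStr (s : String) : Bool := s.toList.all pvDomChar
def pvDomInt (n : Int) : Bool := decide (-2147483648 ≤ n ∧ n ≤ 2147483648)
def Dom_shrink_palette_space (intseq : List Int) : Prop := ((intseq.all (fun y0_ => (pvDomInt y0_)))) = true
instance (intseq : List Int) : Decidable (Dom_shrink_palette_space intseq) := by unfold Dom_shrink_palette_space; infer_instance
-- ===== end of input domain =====

-- B replaces A's dict+counter with the palette list itself (compact index = position in the ordered-dedup list, via list.index): simpler, same return value.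


-- ===== PORT A =====
-- state: (mappings, reverts, accum, new_color_counter)
def pvALoop (st : PySem.Dict Int Int × List Int × List Int × Int) (index : Int) :
    PySem.Dict Int Int × List Int × List Int × Int :=
  match PySem.Dict.get? st.1 index with
  | some indmap => (st.1, st.2.1, st.2.2.1 ++ [indmap], st.2.2.2)
  | none =>
      (st.1.insert index st.2.2.2, st.2.1 ++ [index], st.2.2.1 ++ [st.2.2.2], st.2.2.2 + 1)

def shrink_palette_space (intseq : List Int) : List (String × List Int) :=
  let st := intseq.foldl pvALoop (PySem.Dict.ofList [((0 : Int), (0 : Int))], [0], [], 1)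
  [("mapping", st.2.1), ("seq", st.2.2.1)]

-- ===== PORT B =====
-- 'if v not in reverts: reverts.append(v)'
def pvDedup (rev : List Int) (v : Int) : List Int :=
  if v ∈ rev then rev else rev ++ [v]

def shrink_palette_space_alt (intseq : List Int) : List (String × List Int) :=
  let reverts := intseq.foldl pvDedup [0]
  -- reverts.index(v): every element occurs in reverts, so getD is exact
  [("mapping", reverts),
   ("seq", intseq.map (fun v => (Int.ofNat ((PySem.List.index? reverts v).getD 0))))]

-- ===== PRECONDITION & SPEC =====
def Spec_shrink_palette_space (intseq : List Int) (out : List (String × List Int)) : Prop := out = shrink_palette_space_alt intseq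
instance (intseq : List Int) (out : List (String × List Int)) : Decidable (Spec_shrink_palette_space intseq out) := by unfold Spec_shrink_palette_space; infer_instance

-- ===== CLAIM (what is proved, stated in full; the proofs are below) =====
def Claim_equal_shrink_palette_space : Prop := ∀ (intseq : List Int), Dom_shrink_palette_space intseq → Spec_shrink_palette_space intseq (shrink_palette_space intseq)

-- ===== LEMMAS AND PROOFS =====

-- appending a fresh element does not move any element already findable
theorem pvIndex_append_of_ne (rev : List Int) (x k : Int) (h : k ≠ x) :
    PySem.List.index? (rev ++ [x]) k = PySem.List.index? rev k := by
  by_cases hm : k ∈ rev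
  · exact PySem.List.index?_append_of_mem _ hm
  · rw [(PySem.List.index?_eq_none_iff _ _).mpr hm,
        (PySem.List.index?_eq_none_iff _ _).mpr (by simp [hm, h])]

-- pass-one dedup never moves an element already in the list
theorem pvDedup_mono (xs : List Int) :
    ∀ (rev : List Int) (k : Int) (i : Nat),
    PySem.List.index? rev k = some i →
    PySem.List.index? (xs.foldl pvDedup rev) k = some i := by
  induction xs with
  | nil => intro rev k i h; simpa using h
  | cons x xs ih =>
    intro rev k i h
    simp only [List.foldl_cons, pvDedup]
    by_cases hm : x ∈ rev
    · rw [if_pos hm]; exact ih rev k i h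
    · rw [if_neg hm]
      apply ih
      by_cases hk : k = x
      · exfalso
        have : k ∈ rev := (PySem.List.index?_isSome_iff rev k).mp (by rw [h]; rfl)
        exact hm (hk ▸ this)
      · rw [pvIndex_append_of_ne _ _ _ hk]; exact h

-- A's interleaved loop equals dedup plus positional lookup in the final palette
theorem pvMain (xs : List Int) :
    ∀ (m : PySem.Dict Int Int) (rev acc : List Int) (c : Int),
    (∀ k, m.get? k = (PySem.List.index? rev k).map Int.ofNat) →
    c = (rev.length : Int) →
    xs.foldl pvALoop (m, rev, acc, c) =
      ((xs.foldl pvALoop (m, rev, acc, c)).1,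
       xs.foldl pvDedup rev,
       acc ++ xs.map (fun v => Int.ofNat ((PySem.List.index? (xs.foldl pvDedup rev) v).getD 0)),
       (xs.foldl pvALoop (m, rev, acc, c)).2.2.2) := by
  induction xs with
  | nil => intro m rev acc c _ _; simp
  | cons x xs ih =>
    intro m rev acc c hinv hc
    simp only [List.foldl_cons, List.map_cons]
    cases h : PySem.Dict.get? m x with
    | some v =>
      have hx := hinv x
      rw [h] at hx
      cases hix : PySem.List.index? rev x with
      | none => rw [hix] at hx; simp at hx
      | some i =>
        rw [hix] at hx
        have hv : v = Int.ofNat i := by simpa using hx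
        have hmem : x ∈ rev := (PySem.List.index?_isSome_iff rev x).mp (by rw [hix]; rfl)
        simp only [pvALoop, h, pvDedup, if_pos hmem]
        rw [ih m rev (acc ++ [v]) c hinv hc]
        have hfix := pvDedup_mono xs rev x i hix
        rw [PySem.List.index?_eq_idxOf?] at hfix
        simp [hfix, hv]
    | none =>
      have hx := hinv x
      rw [h] at hx
      have hin : PySem.List.index? rev x = none := by
        cases hix : PySem.List.index? rev x with
        | none => rfl
        | some i => rw [hix] at hx; simp at hx
      have hnmem : x ∉ rev := (PySem.List.index?_eq_none_iff rev x).mp hin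
      simp only [pvALoop, h, pvDedup, if_neg hnmem]
      have hinv' : ∀ k, (m.insert x c).get? k = (PySem.List.index? (rev ++ [x]) k).map Int.ofNat := by
        intro k
        by_cases hk : k = x
        · subst hk
          rw [PySem.Dict.get?_insert_self, PySem.List.index?_append_singleton_self rev _ hnmem]
          simp [hc]
        · rw [PySem.Dict.get?_insert, if_neg hk, pvIndex_append_of_ne _ _ _ hk]
          exact hinv k
      have hc' : c + 1 = ((rev ++ [x]).length : Int) := by simp [hc]
      rw [ih (m.insert x c) (rev ++ [x]) (acc ++ [c]) (c + 1) hinv' hc']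
      have hself : PySem.List.index? (rev ++ [x]) x = some rev.length :=
        PySem.List.index?_append_singleton_self rev x hnmem
      have hfix := pvDedup_mono xs (rev ++ [x]) x rev.length hself
      rw [PySem.List.index?_eq_idxOf?] at hfix
      simp [hfix, hc]

-- ===== VERDICT (by name: the statement is the Claim_ definition above) =====
theorem shrink_palette_space_spec : Claim_equal_shrink_palette_space := by
  intro intseq _
  unfold Spec_shrink_palette_space shrink_palette_space shrink_palette_space_alt
  rw [pvMain intseq (PySem.Dict.ofList [((0 : Int), (0 : Int))]) [0] [] 1
        (by
          intro k
          have hd : PySem.Dict.ofList [((0 : Int), (0 : Int))] = PySem.Dict.empty.insert 0 0 := rfl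
          rw [hd]
          by_cases hk : k = 0
          · subst hk
            rw [PySem.Dict.get?_insert_self, PySem.List.index?_cons_self]
            rfl
          · rw [PySem.Dict.get?_insert_of_ne _ _ hk, PySem.Dict.get?_empty,
                PySem.List.index?_cons_of_ne _ (fun h => hk h.symm)]
            rfl)
        (by simp)]
  simp
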